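-- pv_equiv track=rewrite | github.com/dee021/CodingTest | 프로그래머스/unrated/161989. 덧칠하기/덧칠하기.py | solution
-- ===== SOURCE A (Python) =====
-- def solution(n, m, section):
--     answer, end = 0, 0
--     l = len(section)
--     idx = 0
--     while idx < l:
--         f = 1
--         min_range = section[idx]
--         for i in range(idx, l):
--             if f and section[i] in range(min_range, min_range+m):
--                 f = 0
--                 answer += 1
--             if section[i] not in range(min_range, min_range+m):
--                 idx = i
--                 break
--             if i == l - 1:
--                 end = 1
--         if end:
--             break
--     return answer
-- ===== SOURCE B (Python) =====
-- def solution(n, m, section):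
--     answer = 0
--     base = None
--     for s in section:
--         if base is None or not (base <= s < base + m):
--             answer += 1
--             base = s
--     return answer
-- ===== Notes on version B (the rewrite author's own statement) =====
-- stated objective: faster
-- what changed: B replaces A's nested while/for with restart, break flag f, end sentinel and two per-element range-object memberships by a single forward pass keeping only the current stroke's base; Pre_ excludes m <= 0 with a nonempty section, where A loops forever.
import Mathlib
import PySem

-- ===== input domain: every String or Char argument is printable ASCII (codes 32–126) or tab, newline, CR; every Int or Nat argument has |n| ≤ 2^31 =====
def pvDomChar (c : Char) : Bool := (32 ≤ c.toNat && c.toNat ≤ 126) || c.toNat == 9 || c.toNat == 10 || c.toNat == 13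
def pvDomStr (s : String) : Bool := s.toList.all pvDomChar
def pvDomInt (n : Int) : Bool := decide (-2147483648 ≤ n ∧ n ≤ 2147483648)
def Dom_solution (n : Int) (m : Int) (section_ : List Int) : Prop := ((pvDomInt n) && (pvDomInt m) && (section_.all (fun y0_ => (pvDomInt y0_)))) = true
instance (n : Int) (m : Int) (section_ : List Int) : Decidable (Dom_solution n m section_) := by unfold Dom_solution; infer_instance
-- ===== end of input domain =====

-- B is a single greedy pass tracking only the current stroke's base; same return value as A wherever A terminates.

-- ===== PORT A =====
-- inner `for i in range(idx, l)` loop of A; fuel counts the remaining indices i..l-1.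
-- result: (some i, answer, _) = loop broke at i (Python sets idx = i); (none, answer, e) = loop ran out, e = end flag.
def solutionInner (sec : List Int) (l : Nat) (m minr : Int) :
    Nat → Nat → Bool → Int → Option Nat × Int × Bool
  | 0, _, _, ans => (none, ans, false)
  | k+1, i, f, ans =>
    let v := sec.getD i 0
    let inR : Bool := decide (minr ≤ v ∧ v < minr + m)
    let f' := if f && inR then false else f
    let ans' := if f && inR then ans + 1 else ans
    if !inR then (some i, ans', false)
    else if i = l - 1 then (none, ans', true)
    else solutionInner sec l m minr k (i+1) f' ans'

-- outer `while idx < l` loop of A (min_range = section[idx] inlined); idx strictly increases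
-- each turn whenever the Python terminates, so fuel l+1 suffices (the fuel only makes the
-- port total on the inputs where the Python loops forever, which Pre_ excludes).
def solutionOuter (sec : List Int) (l : Nat) (m : Int) :
    Nat → Nat → Int → Int
  | 0, _, ans => ans
  | fuel+1, idx, ans =>
    if idx < l then
      match solutionInner sec l m (sec.getD idx 0) (l - idx) idx true ans with
      | (some i, ans', _) => solutionOuter sec l m fuel i ans'
      | (none, ans', e) => if e then ans' else solutionOuter sec l m fuel idx ans'
    else ans

def solution (n : Int) (m : Int) (section_ : List Int) : Int :=
  solutionOuter section_ section_.length m (section_.length + 1) 0 0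

-- ===== PORT B =====
def altStep (m : Int) (st : Int × Option Int) (s : Int) : Int × Option Int :=
  match st.2 with
  | none => (st.1 + 1, some s)
  | some base => if base ≤ s ∧ s < base + m then st else (st.1 + 1, some s)

def solution_alt (n : Int) (m : Int) (section_ : List Int) : Int :=
  (section_.foldl (altStep m) (0, none)).1

-- ===== PRECONDITION & SPEC =====
-- Pre_ excludes exactly the inputs on which the Python A never returns: with m ≤ 0 and a
-- nonempty section the inner loop breaks at idx itself, so the while loop repeats forever.
def Pre_solution (n : Int) (m : Int) (section_ : List Int) : Prop := section_ = [] ∨ 1 ≤ m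
instance (n : Int) (m : Int) (section_ : List Int) : Decidable (Pre_solution n m section_) := by unfold Pre_solution; infer_instance
def pvWitness_solution : Int × Int × List Int := (8, 4, [2, 4, 5, 9])
def Spec_solution (n : Int) (m : Int) (section_ : List Int) (out : Int) : Prop := out = solution_alt n m section_
instance (n : Int) (m : Int) (section_ : List Int) (out : Int) : Decidable (Spec_solution n m section_ out) := by unfold Spec_solution; infer_instance

-- ===== CLAIM (what is proved, stated in full; the proofs are below) =====
def Claim_equal_solution : Prop := ∀ (n : Int) (m : Int) (section_ : List Int), Dom_solution n m section_ → Pre_solution n m section_ → Spec_solution n m section_ (solution n m section_)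

-- ===== LEMMAS AND PROOFS =====

theorem drop_cons_getD (sec : List Int) (i : Nat) (h : i < sec.length) :
    sec.drop i = sec.getD i 0 :: sec.drop (i+1) := by
  rw [List.drop_eq_getElem_cons h]
  congr 1
  simp [List.getD_eq_getElem?_getD, List.getElem?_eq_getElem h]

-- characterisation of A's inner loop after its first step (f = false):
-- either it breaks at the first index j whose element leaves the range (answer unchanged,
-- B's fold skips the indices i..j-1), or every remaining element is in range (end flag set).
theorem inner_char (sec : List Int) (m minr : Int) :
    ∀ (k i : Nat) (ans : Int), i + k = sec.length →
    (∃ j, solutionInner sec sec.length m minr k i false ans = (some j, ans, false) ∧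
        i ≤ j ∧ j < sec.length ∧
        ¬ (minr ≤ sec.getD j 0 ∧ sec.getD j 0 < minr + m) ∧
        ∀ b : Int, List.foldl (altStep m) (b, some minr) (sec.drop i) =
                   List.foldl (altStep m) (b, some minr) (sec.drop j))
    ∨ (∃ e, solutionInner sec sec.length m minr k i false ans = (none, ans, e) ∧
        (k = 0 ∨ e = true) ∧
        ∀ b : Int, List.foldl (altStep m) (b, some minr) (sec.drop i) = (b, some minr)) := by
  intro k
  induction k with
  | zero =>
    intro i ans hi
    right
    refine ⟨false, rfl, Or.inl rfl, ?_⟩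
    intro b
    have h0 : sec.drop i = [] := List.drop_eq_nil_of_le (by omega)
    simp [h0]
  | succ k ih =>
    intro i ans hi
    have hil : i < sec.length := by omega
    have hdrop := drop_cons_getD sec i hil
    by_cases hin : minr ≤ sec.getD i 0 ∧ sec.getD i 0 < minr + m
    · have hinG : minr ≤ sec[i]?.getD 0 ∧ sec[i]?.getD 0 < minr + m := by
        simpa [List.getD_eq_getElem?_getD] using hin
      by_cases hlast : i = sec.length - 1
      · right
        refine ⟨true, ?_, Or.inr rfl, ?_⟩
        · subst hlast
          simp [solutionInner, hinG]
        · intro b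
          have h2 : sec.drop (i+1) = [] := List.drop_eq_nil_of_le (by omega)
          rw [hdrop, List.foldl_cons, h2]
          simp [altStep, hin, hinG]
      · have hstep : solutionInner sec sec.length m minr (k+1) i false ans =
            solutionInner sec sec.length m minr k (i+1) false ans := by
          simp [solutionInner, hinG, hlast]
        rcases ih (i+1) ans (by omega) with ⟨j, hj, hij, hjl, hnin, hfold⟩ | ⟨e, he, hke, hfold⟩
        · left
          refine ⟨j, by rw [hstep, hj], by omega, hjl, hnin, ?_⟩
          intro b
          rw [hdrop, List.foldl_cons]
          have h1 : altStep m (b, some minr) (sec.getD i 0) = (b, some minr) := by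
            simp [altStep, hin, hinG]
          rw [h1, hfold b]
        · right
          refine ⟨e, by rw [hstep, he], ?_, ?_⟩
          · rcases hke with h0 | h1
            · omega
            · exact Or.inr h1
          · intro b
            rw [hdrop, List.foldl_cons]
            have h1 : altStep m (b, some minr) (sec.getD i 0) = (b, some minr) := by
              simp [altStep, hin, hinG]
            rw [h1, hfold b]
    · left
      have hinG : ¬ (minr ≤ sec[i]?.getD 0 ∧ sec[i]?.getD 0 < minr + m) := by
        simpa [List.getD_eq_getElem?_getD] using hin
      refine ⟨i, ?_, le_refl i, hil, hin, fun b => rfl⟩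
      simp [solutionInner, hinG]

-- A's outer loop equals B's fold over the remaining suffix (state: answer, no open stroke)
theorem outer_fold (sec : List Int) (m : Int) (hm : 1 ≤ m) :
    ∀ (fuel idx : Nat) (ans : Int), idx ≤ sec.length → sec.length - idx ≤ fuel →
    solutionOuter sec sec.length m fuel idx ans
      = (List.foldl (altStep m) (ans, none) (sec.drop idx)).1 := by
  intro fuel
  induction fuel with
  | zero =>
    intro idx ans hle hf
    have hidx : idx = sec.length := by omega
    subst hidx
    simp [solutionOuter, List.drop_length]
  | succ fuel ih =>
    intro idx ans hle hf
    by_cases hidx : idx < sec.length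
    · have hdrop := drop_cons_getD sec idx hidx
      have hinvG : sec.getD idx 0 ≤ sec[idx]?.getD 0 ∧ sec[idx]?.getD 0 < sec.getD idx 0 + m := by
        constructor
        · simp [List.getD_eq_getElem?_getD]
        · simp only [List.getD_eq_getElem?_getD]; linarith
      have hk : sec.length - idx = (sec.length - idx - 1) + 1 := by omega
      have hmp : (0:Int) < m := by omega
      have hmn : ¬ m ≤ 0 := by omega
      have h1 : altStep m (ans, none) (sec.getD idx 0) = (ans+1, some (sec.getD idx 0)) := by
        simp [altStep]
      by_cases hlast : idx = sec.length - 1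
      · have hinner : solutionInner sec sec.length m (sec.getD idx 0) (sec.length - idx) idx true ans
            = (none, ans + 1, true) := by
          rw [hk]
          simp only [solutionInner]
          simp [hinvG, hlast, hmp, hmn]
        have h2 : sec.drop (idx+1) = [] := List.drop_eq_nil_of_le (by omega)
        have houter : solutionOuter sec sec.length m (fuel+1) idx ans = ans + 1 := by
          simp only [solutionOuter]
          rw [if_pos hidx, hinner]
          rfl
        rw [houter, hdrop, List.foldl_cons, h1, h2]
        rfl
      · have hinner : solutionInner sec sec.length m (sec.getD idx 0) (sec.length - idx) idx true ans
            = solutionInner sec sec.length m (sec.getD idx 0) (sec.length - idx - 1) (idx+1) false (ans+1) := by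
          rw [hk]
          simp only [solutionInner]
          simp [hinvG, hlast, hmp, hmn]
        rcases inner_char sec m (sec.getD idx 0) (sec.length - idx - 1) (idx+1) (ans+1) (by omega) with
          ⟨j, hj, hij, hjl, hnin, hfold⟩ | ⟨e, he, hke, hfold⟩
        · -- inner loop broke at j: the while loop restarts there with idx = j
          have houter : solutionOuter sec sec.length m (fuel+1) idx ans =
              solutionOuter sec sec.length m fuel j (ans+1) := by
            simp only [solutionOuter]
            rw [if_pos hidx, hinner, hj]
          rw [houter, ih j (ans+1) (by omega) (by omega)]
          have hdropj := drop_cons_getD sec j hjl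
          rw [hdrop, List.foldl_cons, h1, hfold (ans+1), hdropj, List.foldl_cons, List.foldl_cons]
          have h2 : altStep m (ans+1, some (sec.getD idx 0)) (sec.getD j 0)
              = (ans+1+1, some (sec.getD j 0)) := by
            simp only [altStep]
            rw [if_neg hnin]
          have h3 : altStep m (ans+1, (none : Option Int)) (sec.getD j 0)
              = (ans+1+1, some (sec.getD j 0)) := by
            simp [altStep]
          rw [h2, h3]
        · -- inner loop ran to the end: end flag set, the fold keeps the state unchanged
          have he' : e = true := by
            rcases hke with h0 | h1
            · omega
            · exact h1
          subst he'
          have houter : solutionOuter sec sec.length m (fuel+1) idx ans = ans + 1 := by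
            simp only [solutionOuter]
            rw [if_pos hidx, hinner, he]
            rfl
          rw [houter, hdrop, List.foldl_cons, h1, hfold (ans+1)]
    · have h0 : idx = sec.length := by omega
      subst h0
      simp [solutionOuter, List.drop_length]
-- ===== VERDICT (by name: the statement is the Claim_ definition above) =====
theorem solution_spec : Claim_equal_solution := by
  intro n m section_ _ hpre
  unfold Spec_solution solution solution_alt
  rcases hpre with hnil | hm
  · subst hnil; rfl
  · rw [outer_fold section_ m hm (section_.length + 1) 0 0 (by omega) (by omega)]
    rfl
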